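-- pv_equiv track=rewrite | github.com/YuanxiangFranck/PIE_ISAE_Essais_Vol | algorithms/flight_analysis_fun.py | idx2port
-- ===== SOURCE A (Python) =====
-- def idx2date(dates, idx, sl_w, sl_s):
--     """
--     Get real time segments corresponding to the index of a sample
--     in a sliding window decomposition with parameters sl_w, sl_s
--
--     Warning : this function takes into consideration the case when the time
--     window overlaps on two occurrences of the same flight phase. However, it
--     won't work if an occurence of the flight phase is shorter than the time
--     window sl_w itself !
--     """
--     i_start,i_stop = 0,0
--     remaining = 0
--     elapsed = 0
--     # find start index
--     for i in range(len(dates)):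
--         if dates[i][0] + idx*sl_s - elapsed <= dates[i][1]:
--             i_start = i
--             remaining = dates[i_start][0] + idx*sl_s + sl_w \
--                         - elapsed - dates[i_start][1]
--             break
--         elapsed += dates[i][1] - dates[i][0]
--     # if overlap, set stop index to the next occurence
--     if remaining > 0:
--         i_stop = i_start+1
--         return (dates[i_start][0] + idx * sl_s - elapsed, dates[i_start][1],\
--                 dates[i_stop][0], dates[i_stop][0] + remaining)
--     else:
--         return (dates[i_start][0] + idx * sl_s - elapsed, \
--                 dates[i_start][0] + idx * sl_s + sl_w - elapsed)
--
-- def idx2port(start, stop, ports, idx, sl_w, sl_s):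
--     sides = (('apu', 'hp1', 'ip1', 'no bleed'),
--              ('apu', 'hp2', 'ip2', 'no bleed'))
--     res = [None, None]
--     for k,side in enumerate(sides):
--         for port in ports.items():
--             port_name, port_dates = port
--             if port_name in side:
--                 for i,dates in enumerate(port_dates):
--                     if dates[0] <= idx2date([(start,stop)], idx, sl_w, sl_s)[0] <= dates[1]:
--                         res[k] = port_name,i
--     return res
-- ===== SOURCE B (Python) =====
-- def idx2date(dates, idx, sl_w, sl_s):
--     # same-module helper, reused unchanged from the source file
--     i_start, i_stop = 0, 0
--     remaining = 0
--     elapsed = 0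
--     for i in range(len(dates)):
--         if dates[i][0] + idx*sl_s - elapsed <= dates[i][1]:
--             i_start = i
--             remaining = dates[i_start][0] + idx*sl_s + sl_w \
--                         - elapsed - dates[i_start][1]
--             break
--         elapsed += dates[i][1] - dates[i][0]
--     if remaining > 0:
--         i_stop = i_start+1
--         return (dates[i_start][0] + idx * sl_s - elapsed, dates[i_start][1],
--                 dates[i_stop][0], dates[i_stop][0] + remaining)
--     else:
--         return (dates[i_start][0] + idx * sl_s - elapsed,
--                 dates[i_start][0] + idx * sl_s + sl_w - elapsed)
--
--
-- def idx2port(start, stop, ports, idx, sl_w, sl_s):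
--     sides = (('apu', 'hp1', 'ip1', 'no bleed'),
--              ('apu', 'hp2', 'ip2', 'no bleed'))
--     relevant = frozenset(sides[0]) | frozenset(sides[1])
--     # Stage 1: collect every matching (port_name, i) in one pass, in encounter order.
--     # The target time is decoded lazily, only once a relevant non-empty port is seen.
--     target = None
--     matches = []
--     for name, dl in ports.items():
--         if name in relevant and dl:
--             if target is None:
--                 target = idx2date([(start, stop)], idx, sl_w, sl_s)[0]
--             for i, d in enumerate(dl):
--                 if d[0] <= target <= d[1]:
--                     matches.append((name, i))
--     # Stage 2: per side, the answer is the last collected match belonging to it.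
--     return [next((m for m in reversed(matches) if m[0] in side), None)
--             for side in sides]
-- ===== Notes on version B (the rewrite author's own statement) =====
-- stated objective: alternative
-- what changed: B replaces A's two-side outer loop with per-test re-evaluation of idx2date by a staged algorithm: one pass over ports collects every matching (name, index) into a list (decoding the target time lazily, once), then each side's answer is the first element of the reversed match list whose name belongs to that side.
import Mathlib
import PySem

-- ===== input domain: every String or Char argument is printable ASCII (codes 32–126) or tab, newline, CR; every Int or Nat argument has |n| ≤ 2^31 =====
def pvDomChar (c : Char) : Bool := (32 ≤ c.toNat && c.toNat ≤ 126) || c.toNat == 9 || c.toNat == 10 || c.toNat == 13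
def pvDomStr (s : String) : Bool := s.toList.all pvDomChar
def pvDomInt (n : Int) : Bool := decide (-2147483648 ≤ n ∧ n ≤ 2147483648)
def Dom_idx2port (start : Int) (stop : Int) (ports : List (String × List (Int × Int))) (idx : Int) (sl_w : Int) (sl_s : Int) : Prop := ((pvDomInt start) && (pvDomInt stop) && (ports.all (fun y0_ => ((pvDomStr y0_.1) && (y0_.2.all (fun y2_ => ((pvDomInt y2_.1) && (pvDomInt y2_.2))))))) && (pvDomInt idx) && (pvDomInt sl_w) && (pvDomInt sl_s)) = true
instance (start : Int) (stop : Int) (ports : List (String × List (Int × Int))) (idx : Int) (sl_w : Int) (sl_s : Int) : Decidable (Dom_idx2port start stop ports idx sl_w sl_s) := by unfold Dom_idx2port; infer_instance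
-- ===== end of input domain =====

-- B replaces A's two-side outer loop (re-evaluating idx2date per innermost test) by a staged
-- algorithm: collect all matches in one pass, then per side pick the last match (objective: alternative).

-- the two side tuples
def pvSide0 : List String := ["apu", "hp1", "ip1", "no bleed"]
def pvSide1 : List String := ["apu", "hp2", "ip2", "no bleed"]

-- idx2date's "find start index" loop: returns (i_start, remaining, elapsed)
-- (shared module helper: idx2date is used verbatim by both A and B)
def idx2dateLoop (idx sl_s sl_w : Int) : List (Int × Int) → Nat → Int → Nat × Int × Int
  | [], _, elapsed => (0, 0, elapsed)
  | d :: rest, i, elapsed =>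
    if d.1 + idx * sl_s - elapsed ≤ d.2 then
      (i, d.1 + idx * sl_s + sl_w - elapsed - d.2, elapsed)
    else idx2dateLoop idx sl_s sl_w rest (i + 1) (elapsed + (d.2 - d.1))

-- idx2date; none = IndexError
def idx2dateFn (dates : List (Int × Int)) (idx sl_w sl_s : Int) : Option (List Int) :=
  let r := idx2dateLoop idx sl_s sl_w dates 0 0
  let i_start := r.1
  let remaining := r.2.1
  let elapsed := r.2.2
  if remaining > 0 then
    match PySem.List.pyGet? dates (Int.ofNat i_start), PySem.List.pyGet? dates (Int.ofNat (i_start + 1)) with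
    | some ds, some dn => some [ds.1 + idx * sl_s - elapsed, ds.2, dn.1, dn.1 + remaining]
    | _, _ => none
  else
    match PySem.List.pyGet? dates (Int.ofNat i_start) with
    | some ds => some [ds.1 + idx * sl_s - elapsed, ds.1 + idx * sl_s + sl_w - elapsed]
    | none => none

-- ===== PORT A =====
-- A's innermost condition: dates[0] <= idx2date([(start,stop)], idx, sl_w, sl_s)[0] <= dates[1]
-- (false when idx2date raises; those inputs are excluded by Pre_)
def aCond (start stop idx sl_w sl_s d0 d1 : Int) : Bool :=
  match (idx2dateFn [(start, stop)] idx sl_w sl_s).bind (fun l => PySem.List.pyGet? l 0) with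
  | some v => decide (d0 ≤ v ∧ v ≤ d1)
  | none => false

-- A's loop over enumerate(port_dates), last match wins
def aScanDates (start stop idx sl_w sl_s : Int) (name : String) :
    List (Int × (Int × Int)) → Option (String × Int) → Option (String × Int)
  | [], acc => acc
  | (i, d) :: rest, acc =>
    aScanDates start stop idx sl_w sl_s name rest
      (if aCond start stop idx sl_w sl_s d.1 d.2 then some (name, i) else acc)

-- A's loop over ports.items() for one side
def aScanPorts (start stop idx sl_w sl_s : Int) (side : List String) :
    List (String × List (Int × Int)) → Option (String × Int) → Option (String × Int)
  | [], acc => acc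
  | (name, dl) :: rest, acc =>
    aScanPorts start stop idx sl_w sl_s side rest
      (if name ∈ side then
        aScanDates start stop idx sl_w sl_s name (PySem.List.enumerate dl) acc
      else acc)

def idx2port (start : Int) (stop : Int) (ports : List (String × List (Int × Int))) (idx : Int) (sl_w : Int) (sl_s : Int) : List (Option (String × Int)) :=
  [aScanPorts start stop idx sl_w sl_s pvSide0 ports none,
   aScanPorts start stop idx sl_w sl_s pvSide1 ports none]

-- ===== PORT B =====
-- frozenset(sides[0]) | frozenset(sides[1]) (membership only)
def pvRelevant : List String := ["apu", "hp1", "ip1", "no bleed", "hp2", "ip2"]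

-- the lazily decoded target time idx2date([(start,stop)], idx, sl_w, sl_s)[0]; none = IndexError
def bTarget (start stop idx sl_w sl_s : Int) : Option Int :=
  (idx2dateFn [(start, stop)] idx sl_w sl_s).bind (fun l => PySem.List.pyGet? l 0)

-- B's inner loop: append (name, i) for every enumerated date range containing v
def bInner (v : Int) (name : String) : List (Int × (Int × Int)) → List (String × Int)
  | [] => []
  | (i, d) :: rest =>
    if d.1 ≤ v ∧ v ≤ d.2 then (name, i) :: bInner v name rest else bInner v name rest

-- B's stage 1: one pass over ports.items(); state = (cached target, collected matches).
-- (In Python the `none` target raises IndexError when forced; excluded by Pre_, so the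
-- [] result in that branch is never reached on admitted inputs.)
def bCollect (start stop idx sl_w sl_s : Int) :
    List (String × List (Int × Int)) → Option Int × List (String × Int) → Option Int × List (String × Int)
  | [], st => st
  | (name, dl) :: rest, st =>
    bCollect start stop idx sl_w sl_s rest
      (if name ∈ pvRelevant ∧ dl ≠ [] then
        let t := st.1.or (bTarget start stop idx sl_w sl_s)
        (t, st.2 ++ (match t with
          | some v => bInner v name (PySem.List.enumerate dl)
          | none => []))
      else st)

-- B's stage 2: next((m for m in reversed(matches) if m[0] in side), None)
def bPick (side : List String) : List (String × Int) → Option (String × Int)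
  | [] => none
  | m :: rest => if m.1 ∈ side then some m else bPick side rest

def idx2port_alt (start : Int) (stop : Int) (ports : List (String × List (Int × Int))) (idx : Int) (sl_w : Int) (sl_s : Int) : List (Option (String × Int)) :=
  let ms := (bCollect start stop idx sl_w sl_s ports (none, [])).2
  [bPick pvSide0 ms.reverse, bPick pvSide1 ms.reverse]

-- ===== PRECONDITION & SPEC =====
-- Pre_ excludes exactly the inputs on which BOTH programs raise IndexError: the decoded window
-- overlaps past `stop` and some port named in a side has a nonempty date list, so idx2date is
-- forced and indexes past its singleton list.
def Pre_idx2port (start : Int) (stop : Int) (ports : List (String × List (Int × Int))) (idx : Int) (sl_w : Int) (sl_s : Int) : Prop :=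
  ¬ (start + idx * sl_s ≤ stop ∧ stop < start + idx * sl_s + sl_w ∧
     ∃ p ∈ ports, p.1 ∈ (pvSide0 ++ pvSide1) ∧ p.2 ≠ [])
instance (start : Int) (stop : Int) (ports : List (String × List (Int × Int))) (idx : Int) (sl_w : Int) (sl_s : Int) : Decidable (Pre_idx2port start stop ports idx sl_w sl_s) := by unfold Pre_idx2port; infer_instance

def pvWitness_idx2port : Int × Int × (List (String × List (Int × Int))) × Int × Int × Int :=
  (0, 10, [("apu", [(0, 5)]), ("hp2", [(0, 3)])], 1, 2, 1)

def Spec_idx2port (start : Int) (stop : Int) (ports : List (String × List (Int × Int))) (idx : Int) (sl_w : Int) (sl_s : Int) (out : List (Option (String × Int))) : Prop := out = idx2port_alt start stop ports idx sl_w sl_s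
instance (start : Int) (stop : Int) (ports : List (String × List (Int × Int))) (idx : Int) (sl_w : Int) (sl_s : Int) (out : List (Option (String × Int))) : Decidable (Spec_idx2port start stop ports idx sl_w sl_s out) := by unfold Spec_idx2port; infer_instance

-- ===== CLAIM (what is proved, stated in full; the proofs are below) =====
def Claim_equal_idx2port : Prop := ∀ (start : Int) (stop : Int) (ports : List (String × List (Int × Int))) (idx : Int) (sl_w : Int) (sl_s : Int), Dom_idx2port start stop ports idx sl_w sl_s → Pre_idx2port start stop ports idx sl_w sl_s → Spec_idx2port start stop ports idx sl_w sl_s (idx2port start stop ports idx sl_w sl_s)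

-- ===== LEMMAS AND PROOFS =====

-- pure description of the matches B collects, for a fixed target option tv
def bCollectSpec (tv : Option Int) : List (String × List (Int × Int)) → List (String × Int)
  | [] => []
  | (name, dl) :: rest =>
    (if name ∈ pvRelevant ∧ dl ≠ [] then
      (match tv with
        | some v => bInner v name (PySem.List.enumerate dl)
        | none => [])
    else []) ++ bCollectSpec tv rest

theorem bCollect_eq_spec (start stop idx sl_w sl_s : Int) :
    ∀ (ps : List (String × List (Int × Int))) (t0 : Option Int) (ms : List (String × Int)),
      (t0 = none ∨ t0 = bTarget start stop idx sl_w sl_s) →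
      (bCollect start stop idx sl_w sl_s ps (t0, ms)).2 =
        ms ++ bCollectSpec (bTarget start stop idx sl_w sl_s) ps := by
  intro ps
  induction ps with
  | nil => intro t0 ms _; simp [bCollect, bCollectSpec]
  | cons hd tl ih =>
    intro t0 ms ht
    obtain ⟨name, dl⟩ := hd
    simp only [bCollect, bCollectSpec]
    by_cases hcnd : name ∈ pvRelevant ∧ dl ≠ []
    · rw [if_pos hcnd, if_pos hcnd]
      have hteq : t0.or (bTarget start stop idx sl_w sl_s) = bTarget start stop idx sl_w sl_s := by
        rcases ht with h | h
        · rw [h, Option.none_or]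
        · rw [h, Option.or_self]
      rw [hteq, ih _ _ (Or.inr rfl), List.append_assoc]
    · rw [if_neg hcnd, if_neg hcnd, ih _ _ ht, List.nil_append]

-- bPick distributes over append as first-match
theorem bPick_append (side : List String) (l1 l2 : List (String × Int)) :
    bPick side (l1 ++ l2) = ((bPick side l1).or (bPick side l2)) := by
  induction l1 with
  | nil => simp [bPick]
  | cons m rest ih =>
    by_cases h : m.1 ∈ side
    · simp [bPick, h, Option.or]
    · simp [bPick, h, ih]

theorem bPick_none (side : List String) (l : List (String × Int))
    (h : ∀ m ∈ l, m.1 ∉ side) : bPick side l = none := by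
  induction l with
  | nil => rfl
  | cons m rest ih =>
    simp only [bPick, if_neg (h m (by simp))]
    exact ih fun m hm => h m (List.mem_cons_of_mem _ hm)

theorem bInner_fst (v : Int) (name : String) (l : List (Int × (Int × Int))) :
    ∀ m ∈ bInner v name l, m.1 = name := by
  induction l with
  | nil => intro m hm; cases hm
  | cons hd tl ih =>
    obtain ⟨i, d⟩ := hd
    intro m hm
    simp only [bInner] at hm
    split_ifs at hm with h
    · rcases List.mem_cons.1 hm with h' | h'
      · subst h'; rfl
      · exact ih m h'
    · exact ih m hm

-- A's inner loop vs B's collected inner matches (name ∈ side), when aCond is the v-test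
theorem aScanDates_eq_pick (start stop idx sl_w sl_s v : Int) (name : String) (side : List String)
    (hc : ∀ d0 d1, aCond start stop idx sl_w sl_s d0 d1 = decide (d0 ≤ v ∧ v ≤ d1))
    (hn : name ∈ side) :
    ∀ (el : List (Int × (Int × Int))) (acc : Option (String × Int)),
      aScanDates start stop idx sl_w sl_s name el acc =
        ((bPick side (bInner v name el).reverse).or acc) := by
  intro el
  induction el with
  | nil => intro acc; simp [aScanDates, bInner, bPick, Option.or]
  | cons hd tl ih =>
    intro acc
    obtain ⟨i, d⟩ := hd
    simp only [aScanDates, bInner, hc, decide_eq_true_eq]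
    by_cases hcnd : d.1 ≤ v ∧ v ≤ d.2
    · rw [if_pos hcnd, if_pos hcnd, ih, List.reverse_cons, bPick_append]
      have hone : bPick side [(name, i)] = some (name, i) := by simp [bPick, hn]
      rw [hone]
      cases bPick side (bInner v name tl).reverse <;> rfl
    · rw [if_neg hcnd, if_neg hcnd]
      exact ih acc

-- A's port scan for one side vs picking the last collected match of that side
theorem aScanPorts_eq_pick (start stop idx sl_w sl_s v : Int) (side : List String)
    (hc : ∀ d0 d1, aCond start stop idx sl_w sl_s d0 d1 = decide (d0 ≤ v ∧ v ≤ d1))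
    (hside : ∀ s ∈ side, s ∈ pvRelevant) :
    ∀ (ps : List (String × List (Int × Int))) (acc : Option (String × Int)),
      aScanPorts start stop idx sl_w sl_s side ps acc =
        ((bPick side (bCollectSpec (some v) ps).reverse).or acc) := by
  intro ps
  induction ps with
  | nil => intro acc; simp [aScanPorts, bCollectSpec, bPick, Option.or]
  | cons hd tl ih =>
    intro acc
    obtain ⟨name, dl⟩ := hd
    simp only [aScanPorts, bCollectSpec]
    rw [ih, List.reverse_append, bPick_append]
    have hhead : ∀ acc', ((bPick side (if name ∈ pvRelevant ∧ dl ≠ [] then bInner v name (PySem.List.enumerate dl) else []).reverse).or acc') =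
        (if name ∈ side then aScanDates start stop idx sl_w sl_s name (PySem.List.enumerate dl) acc' else acc') := by
      intro acc'
      by_cases hn : name ∈ side
      · rw [if_pos hn, aScanDates_eq_pick start stop idx sl_w sl_s v name side hc hn]
        by_cases hr : name ∈ pvRelevant ∧ dl ≠ []
        · rw [if_pos hr]
        · rw [if_neg hr]
          have hdl : dl = [] := by
            by_contra hne
            exact hr ⟨hside name hn, hne⟩
          subst hdl
          simp [bInner, bPick, Option.or, PySem.List.enumerate]
      · rw [if_neg hn]
        have : bPick side (if name ∈ pvRelevant ∧ dl ≠ [] then bInner v name (PySem.List.enumerate dl) else []).reverse = none := by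
          apply bPick_none
          intro m hm
          split_ifs at hm with hr
          · rw [bInner_fst v name _ m (List.mem_reverse.1 hm)]; exact hn
          · cases hm
        rw [this]; rfl
    cases hpk : bPick side (bCollectSpec (some v) tl).reverse with
    | some m => rfl
    | none => exact (hhead acc).symm

-- with window overlap, idx2date raises, so the target option is none and aCond is false
theorem bTarget_overlap (start stop idx sl_w sl_s : Int)
    (h1 : start + idx * sl_s ≤ stop) (h2 : stop < start + idx * sl_s + sl_w) :
    bTarget start stop idx sl_w sl_s = none := by
  unfold bTarget idx2dateFn
  have hloop : idx2dateLoop idx sl_s sl_w [(start, stop)] 0 0 = (0, start + idx * sl_s + sl_w - 0 - stop, 0) := by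
    simp only [idx2dateLoop]
    rw [if_pos (by omega : (start, stop).1 + idx * sl_s - 0 ≤ (start, stop).2)]
  rw [hloop]
  have h2' : (0:Int) < start + idx * sl_s + sl_w - 0 - stop := by omega
  simp only [gt_iff_lt, if_pos h2']
  simp [PySem.List.pyGet?, PySem.List.pyIdx?]

-- without window overlap, the target is the closed-form decoded start time
theorem bTarget_no_overlap (start stop idx sl_w sl_s : Int)
    (h : ¬ (start + idx * sl_s ≤ stop ∧ stop < start + idx * sl_s + sl_w)) :
    bTarget start stop idx sl_w sl_s =
      some (if start + idx * sl_s ≤ stop then start + idx * sl_s else start + idx * sl_s - (stop - start)) := by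
  unfold bTarget idx2dateFn
  by_cases h1 : start + idx * sl_s ≤ stop
  · have hloop : idx2dateLoop idx sl_s sl_w [(start, stop)] 0 0 = (0, start + idx * sl_s + sl_w - 0 - stop, 0) := by
      simp only [idx2dateLoop]
      rw [if_pos (by omega : (start, stop).1 + idx * sl_s - 0 ≤ (start, stop).2)]
    rw [hloop]
    have h2 : ¬ ((0:Int) < start + idx * sl_s + sl_w - 0 - stop) := by omega
    simp only [if_neg h2, gt_iff_lt]
    simp [h1, PySem.List.pyGet?, PySem.List.pyIdx?]
  · have hloop : idx2dateLoop idx sl_s sl_w [(start, stop)] 0 0 = (0, 0, 0 + ((start, stop).2 - (start, stop).1)) := by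
      simp only [idx2dateLoop]
      rw [if_neg (by omega : ¬ (start, stop).1 + idx * sl_s - 0 ≤ (start, stop).2)]
    rw [hloop]
    simp only [gt_iff_lt, lt_irrefl]
    simp only [h1, ite_false]
    simp [PySem.List.pyGet?, PySem.List.pyIdx?]

theorem aCond_eq_target (start stop idx sl_w sl_s d0 d1 : Int) :
    aCond start stop idx sl_w sl_s d0 d1 =
      (match bTarget start stop idx sl_w sl_s with
        | some v => decide (d0 ≤ v ∧ v ≤ d1)
        | none => false) := rfl

theorem aCond_false (start stop idx sl_w sl_s d0 d1 : Int)
    (h1 : start + idx * sl_s ≤ stop) (h2 : stop < start + idx * sl_s + sl_w) :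
    aCond start stop idx sl_w sl_s d0 d1 = false := by
  rw [aCond_eq_target, bTarget_overlap start stop idx sl_w sl_s h1 h2]

theorem aScanDates_id (start stop idx sl_w sl_s : Int) (name : String)
    (hf : ∀ d0 d1, aCond start stop idx sl_w sl_s d0 d1 = false) :
    ∀ (el : List (Int × (Int × Int))) (acc : Option (String × Int)),
      aScanDates start stop idx sl_w sl_s name el acc = acc := by
  intro el
  induction el with
  | nil => intro acc; rfl
  | cons hd tl ih =>
    intro acc
    obtain ⟨i, d⟩ := hd
    simp only [aScanDates, hf, Bool.false_eq_true, ite_false]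
    exact ih acc

theorem aScanPorts_id (start stop idx sl_w sl_s : Int) (side : List String)
    (hf : ∀ d0 d1, aCond start stop idx sl_w sl_s d0 d1 = false) :
    ∀ (ps : List (String × List (Int × Int))) (acc : Option (String × Int)),
      aScanPorts start stop idx sl_w sl_s side ps acc = acc := by
  intro ps
  induction ps with
  | nil => intro acc; rfl
  | cons hd tl ih =>
    intro acc
    obtain ⟨name, dl⟩ := hd
    simp only [aScanPorts]
    rw [show (if name ∈ side then aScanDates start stop idx sl_w sl_s name (PySem.List.enumerate dl) acc else acc) = acc by
      split_ifs with hm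
      · exact aScanDates_id start stop idx sl_w sl_s name hf _ acc
      · rfl]
    exact ih acc

theorem bCollectSpec_none (ps : List (String × List (Int × Int))) :
    bCollectSpec none ps = [] := by
  induction ps with
  | nil => rfl
  | cons hd tl ih =>
    obtain ⟨name, dl⟩ := hd
    simp only [bCollectSpec, ih]
    split_ifs <;> rfl

-- ===== VERDICT (by name: the statement is the Claim_ definition above) =====
theorem idx2port_spec : Claim_equal_idx2port := by
  intro start stop ports idx sl_w sl_s _hdom hpre
  unfold Spec_idx2port idx2port idx2port_alt
  rw [bCollect_eq_spec start stop idx sl_w sl_s ports none [] (Or.inl rfl)]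
  by_cases hov : start + idx * sl_s ≤ stop ∧ stop < start + idx * sl_s + sl_w
  · have hf : ∀ d0 d1, aCond start stop idx sl_w sl_s d0 d1 = false :=
      fun d0 d1 => aCond_false start stop idx sl_w sl_s d0 d1 hov.1 hov.2
    rw [aScanPorts_id start stop idx sl_w sl_s pvSide0 hf ports none,
        aScanPorts_id start stop idx sl_w sl_s pvSide1 hf ports none,
        bTarget_overlap start stop idx sl_w sl_s hov.1 hov.2, bCollectSpec_none]
    rfl
  · set v := (if start + idx * sl_s ≤ stop then start + idx * sl_s else start + idx * sl_s - (stop - start)) with hv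
    have ht := bTarget_no_overlap start stop idx sl_w sl_s hov
    have hc : ∀ d0 d1, aCond start stop idx sl_w sl_s d0 d1 = decide (d0 ≤ v ∧ v ≤ d1) := by
      intro d0 d1
      rw [aCond_eq_target, ht]
    rw [ht]
    rw [aScanPorts_eq_pick start stop idx sl_w sl_s v pvSide0 hc (by intro s hs; fin_cases hs <;> simp [pvRelevant]) ports none,
        aScanPorts_eq_pick start stop idx sl_w sl_s v pvSide1 hc (by intro s hs; fin_cases hs <;> simp [pvRelevant]) ports none,
        ← hv]
    simp only [List.nil_append, Option.or_none]
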